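-- pv_equiv track=rewrite | github.com/sagemath/sagetrac-mirror | src/sage/combinat/partition_kleshchev.py | a_good_cell
-- ===== SOURCE A (Python) =====
-- def a_good_cell(kpt, multicharge, convention):
--     from collections import defaultdict
--     # We use a dictionary for the normal nodes as the indexing set is Z when e=0
--     carry = defaultdict(int)        # a tally of #(removable cells)-#(addable cells)
--     ret = None
--
--     if convention[0] == 'L':
--         rows = [(k,r) for k,part in enumerate(kpt) for r in range(len(part)+1)]
--     else:
--         rows = [(k,r) for k,part in reversed(list(enumerate(kpt))) for r in range(len(part)+1)]
--     if convention[1] == 'S':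
--         rows.reverse()
--
--     for row in rows:
--         k,r = row
--         if r == len(kpt[k]): # addable cell at bottom of a component
--             carry[multicharge[k]-r] += 1
--         else:
--             res = multicharge[k] + kpt[k][r] - r - 1
--             if r == len(kpt[k])-1 or kpt[k][r] > kpt[k][r+1]: # removable cell
--                 if carry[res] == 0:
--                     ret = (k, r, kpt[k][r]-1)
--                 else:
--                     carry[res] -= 1
--             if r == 0 or kpt[k][r-1] > kpt[k][r]:             # addable cell
--                 carry[res+1] += 1
--
--     # finally return the result
--     return ret
-- ===== SOURCE B (Python) =====
-- def a_good_cell(kpt, multicharge, convention):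
--     # Build the row order (respecting convention)
--     if convention[0] == 'L':
--         comps = range(len(kpt))
--     else:
--         comps = range(len(kpt)-1, -1, -1)
--     rows = [(k, r) for k in comps for r in range(len(kpt[k])+1)]
--     if convention[1] == 'S':
--         rows.reverse()
--
--     # Flatten the rows into a stream of addable/removable events with their residue keys
--     def row_events(k, r):
--         part = kpt[k]
--         if r == len(part):
--             return [(True, multicharge[k]-r, None)]
--         res = multicharge[k] + part[r] - r - 1
--         evs = []
--         if r == len(part)-1 or part[r] > part[r+1]:
--             evs.append((False, res, (k, r, part[r]-1)))
--         if r == 0 or part[r-1] > part[r]: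
--             evs.append((True, res+1, None))
--         return evs
--
--     events = [e for (k, r) in rows for e in row_events(k, r)]
--
--     # Group the events by residue key, remembering global positions
--     groups = {}
--     for i, (is_add, key, cell) in enumerate(events):
--         groups.setdefault(key, []).append((i, is_add, cell))
--
--     # Per residue: matching scan; an unmatched removable is a candidate.
--     # The answer is the globally last candidate.
--     best = None
--     for key, evs in groups.items():
--         c = 0
--         for i, is_add, cell in evs:
--             if is_add:
--                 c += 1
--             elif c == 0:
--                 if best is None or i > best[0]:
--                     best = (i, cell)
--             else:
--                 c -= 1
--     return None if best is None else best[1]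
-- ===== Notes on version B (the rewrite author's own statement) =====
-- stated objective: alternative
-- what changed: A makes one streaming pass over rows threading a shared carry dictionary and overwriting ret; B flattens the rows into an explicit addable/removable event stream, groups the events by residue key, scans each residue independently with a plain counter collecting unmatched removables, and returns the candidate with the greatest global position.
import Mathlib
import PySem

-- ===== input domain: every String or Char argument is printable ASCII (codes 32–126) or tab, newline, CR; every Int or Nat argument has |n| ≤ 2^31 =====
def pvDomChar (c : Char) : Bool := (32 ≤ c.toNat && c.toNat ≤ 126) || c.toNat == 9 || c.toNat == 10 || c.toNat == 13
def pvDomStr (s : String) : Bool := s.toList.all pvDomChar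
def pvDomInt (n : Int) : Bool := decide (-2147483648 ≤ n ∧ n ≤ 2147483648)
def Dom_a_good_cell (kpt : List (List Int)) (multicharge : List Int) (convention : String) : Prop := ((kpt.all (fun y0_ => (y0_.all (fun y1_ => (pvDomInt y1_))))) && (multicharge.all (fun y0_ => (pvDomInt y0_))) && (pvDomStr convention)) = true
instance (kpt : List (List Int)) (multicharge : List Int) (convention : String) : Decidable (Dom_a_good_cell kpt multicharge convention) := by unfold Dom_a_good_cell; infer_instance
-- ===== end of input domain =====

-- B replaces A's single streaming pass (shared carry dict + overwritten ret) by an event-stream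
-- decomposition: flatten rows to addable/removable events, group by residue key, scan each residue
-- independently with a counter, select the globally last unmatched removable (objective: alternative).

-- ===== PORT A =====
-- one iteration of A's `for row in rows` loop (carry is the defaultdict, ret the running result);
-- kpt[k]/multicharge[k]/part[r] are in range wherever Python A returns, pyGetD's default is a totality guard
def pvAStep (kpt : List (List Int)) (multicharge : List Int)
    (st : PySem.Dict Int Int × Option (Int × Int × Int)) (row : Int × Int) :
    PySem.Dict Int Int × Option (Int × Int × Int) :=
  let carry := st.1
  let ret := st.2
  let k := row.1
  let r := row.2
  let part := PySem.List.pyGetD kpt k []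
  if r = (part.length : Int) then
    (carry.modify (PySem.List.pyGetD multicharge k 0 - r) 0 (· + 1), ret)
  else
    let res := PySem.List.pyGetD multicharge k 0 + PySem.List.pyGetD part r 0 - r - 1
    let st1 :=
      if r = (part.length : Int) - 1 ∨ PySem.List.pyGetD part (r + 1) 0 < PySem.List.pyGetD part r 0 then
        if carry.getD res 0 = 0 then (carry, some (k, r, PySem.List.pyGetD part r 0 - 1))
        else (carry.modify res 0 (· - 1), ret)
      else (carry, ret)
    if r = 0 ∨ PySem.List.pyGetD part r 0 < PySem.List.pyGetD part (r - 1) 0 then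
      (st1.1.modify (res + 1) 0 (· + 1), st1.2)
    else st1

-- A's `rows` list (convention[0] picks the component order, convention[1] == 'S' reverses)
def pvARows (kpt : List (List Int)) (convention : String) : List (Int × Int) :=
  let base :=
    if PySem.Str.pyGet? convention 0 = some 'L' then
      (PySem.List.enumerate kpt).flatMap (fun p =>
        (PySem.List.pyRange 0 ((p.2.length : Int) + 1) 1).map (fun r => (p.1, r)))
    else
      (PySem.List.enumerate kpt).reverse.flatMap (fun p =>
        (PySem.List.pyRange 0 ((p.2.length : Int) + 1) 1).map (fun r => (p.1, r)))
  if PySem.Str.pyGet? convention 1 = some 'S' then base.reverse else base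

def a_good_cell (kpt : List (List Int)) (multicharge : List Int) (convention : String) :
    Option (Int × Int × Int) :=
  ((pvARows kpt convention).foldl (pvAStep kpt multicharge) (PySem.Dict.empty, none)).2

-- ===== PORT B =====
-- Source B's row_events: the 1–2 events of a row, (is_add, residue key, cell)
def pvBRowEvents (kpt : List (List Int)) (multicharge : List Int) (row : Int × Int) :
    List (Bool × Int × Option (Int × Int × Int)) :=
  let k := row.1
  let r := row.2
  let part := PySem.List.pyGetD kpt k []
  if r = (part.length : Int) then [(true, PySem.List.pyGetD multicharge k 0 - r, none)]
  else
    let res := PySem.List.pyGetD multicharge k 0 + PySem.List.pyGetD part r 0 - r - 1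
    (if r = (part.length : Int) - 1 ∨ PySem.List.pyGetD part (r + 1) 0 < PySem.List.pyGetD part r 0 then
      [(false, res, some (k, r, PySem.List.pyGetD part r 0 - 1))] else []) ++
    (if r = 0 ∨ PySem.List.pyGetD part r 0 < PySem.List.pyGetD part (r - 1) 0 then
      [(true, res + 1, none)] else [])

-- Source B's rows: comps is range(len(kpt)) or the countdown range, then the same row comprehension
def pvBRows (kpt : List (List Int)) (convention : String) : List (Int × Int) :=
  let comps :=
    if PySem.Str.pyGet? convention 0 = some 'L' then PySem.List.pyRange 0 (kpt.length : Int) 1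
    else PySem.List.pyRange ((kpt.length : Int) - 1) (-1) (-1)
  let rows := comps.flatMap (fun k =>
    (PySem.List.pyRange 0 (((PySem.List.pyGetD kpt k []).length : Int) + 1) 1).map (fun r => (k, r)))
  if PySem.Str.pyGet? convention 1 = some 'S' then rows.reverse else rows

-- Source B's `if best is None or i > best[0]: best = (i, cell)`
def pvBConsider (best : Option (Int × Option (Int × Int × Int))) (i : Int)
    (cell : Option (Int × Int × Int)) : Option (Int × Option (Int × Int × Int)) :=
  match best with
  | none => some (i, cell)
  | some b => if b.1 < i then some (i, cell) else some b

def a_good_cell_alt (kpt : List (List Int)) (multicharge : List Int) (convention : String) :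
    Option (Int × Int × Int) :=
  let rows := pvBRows kpt convention
  let events := rows.flatMap (pvBRowEvents kpt multicharge)
  -- groups.setdefault(key, []).append((i, is_add, cell))
  let groups : PySem.Dict Int (List (Int × Bool × Option (Int × Int × Int))) :=
    (PySem.List.enumerate events).foldl
      (fun g p => g.modify p.2.2.1 [] (· ++ [(p.1, p.2.1, p.2.2.2)])) PySem.Dict.empty
  -- per-residue matching scan; candidates = unmatched removables, best = max global index
  let best := groups.items.foldl (fun best kv =>
      (kv.2.foldl (fun st ev =>
        if ev.2.1 then (st.1 + 1, st.2)
        else if st.1 = 0 then (st.1, pvBConsider st.2 ev.1 ev.2.2)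
        else (st.1 - 1, st.2)) ((0 : Int), best)).2) none
  best.bind (·.2)

-- ===== PRECONDITION & SPEC =====
-- Pre_ excludes exactly the inputs where Python A raises IndexError: convention shorter than 2
-- characters, or multicharge shorter than kpt (multicharge[k] is read for every component k).
def Pre_a_good_cell (kpt : List (List Int)) (multicharge : List Int) (convention : String) : Prop :=
  2 ≤ (PySem.Str.len convention) ∧ kpt.length ≤ multicharge.length
instance (kpt : List (List Int)) (multicharge : List Int) (convention : String) :
    Decidable (Pre_a_good_cell kpt multicharge convention) := by unfold Pre_a_good_cell; infer_instance

def pvWitness_a_good_cell : List (List Int) × List Int × String := ([[2, 1], [1]], [0, 1], "LS")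

def Spec_a_good_cell (kpt : List (List Int)) (multicharge : List Int) (convention : String)
    (out : Option (Int × Int × Int)) : Prop := out = a_good_cell_alt kpt multicharge convention
instance (kpt : List (List Int)) (multicharge : List Int) (convention : String)
    (out : Option (Int × Int × Int)) : Decidable (Spec_a_good_cell kpt multicharge convention out) := by
  unfold Spec_a_good_cell; infer_instance

-- ===== CLAIM (what is proved, stated in full; the proofs are below) =====
def Claim_equal_a_good_cell : Prop := ∀ (kpt : List (List Int)) (multicharge : List Int) (convention : String), Dom_a_good_cell kpt multicharge convention → Pre_a_good_cell kpt multicharge convention → Spec_a_good_cell kpt multicharge convention (a_good_cell kpt multicharge convention)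

-- ===== LEMMAS AND PROOFS =====

-- A's per-row update = folding a per-event update over the row's events
def pvEStep (st : PySem.Dict Int Int × Option (Int × Int × Int))
    (e : Bool × Int × Option (Int × Int × Int)) :
    PySem.Dict Int Int × Option (Int × Int × Int) :=
  if e.1 then (st.1.modify e.2.1 0 (· + 1), st.2)
  else if st.1.getD e.2.1 0 = 0 then (st.1, e.2.2)
  else (st.1.modify e.2.1 0 (· - 1), st.2)

theorem pvAStep_eq_foldl (kpt : List (List Int)) (multicharge : List Int)
    (st : PySem.Dict Int Int × Option (Int × Int × Int)) (row : Int × Int) :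
    pvAStep kpt multicharge st row = (pvBRowEvents kpt multicharge row).foldl pvEStep st := by
  unfold pvAStep pvBRowEvents
  by_cases h0 : row.2 = ((PySem.List.pyGetD kpt row.1 []).length : Int)
  · simp [h0, pvEStep]
  · simp only [h0, if_false]
    by_cases h1 : row.2 = ((PySem.List.pyGetD kpt row.1 []).length : Int) - 1 ∨
        PySem.List.pyGetD (PySem.List.pyGetD kpt row.1 []) (row.2 + 1) 0 <
          PySem.List.pyGetD (PySem.List.pyGetD kpt row.1 []) row.2 0
    · by_cases h2 : row.2 = 0 ∨
          PySem.List.pyGetD (PySem.List.pyGetD kpt row.1 []) row.2 0 <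
            PySem.List.pyGetD (PySem.List.pyGetD kpt row.1 []) (row.2 - 1) 0
      · by_cases h3 : st.1.getD (PySem.List.pyGetD multicharge row.1 0 +
            PySem.List.pyGetD (PySem.List.pyGetD kpt row.1 []) row.2 0 - row.2 - 1) 0 = 0 <;>
          simp [h1, h2, h3, pvEStep]
      · by_cases h3 : st.1.getD (PySem.List.pyGetD multicharge row.1 0 +
            PySem.List.pyGetD (PySem.List.pyGetD kpt row.1 []) row.2 0 - row.2 - 1) 0 = 0 <;>
          simp [h1, h2, h3, pvEStep]
    · by_cases h2 : row.2 = 0 ∨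
          PySem.List.pyGetD (PySem.List.pyGetD kpt row.1 []) row.2 0 <
            PySem.List.pyGetD (PySem.List.pyGetD kpt row.1 []) (row.2 - 1) 0 <;>
        simp [h1, h2, pvEStep]

theorem pvRows_eq (kpt : List (List Int)) (convention : String) :
    pvARows kpt convention = pvBRows kpt convention := by
  unfold pvARows pvBRows
  have hrange : PySem.List.pyRange ((kpt.length : Int) - 1) (-1) (-1)
      = (PySem.List.pyRange 0 (kpt.length : Int) 1).reverse := by
    rw [PySem.List.pyRange_neg_one_eq_reverse]
    norm_num
  have key : (PySem.List.enumerate kpt).flatMap (fun p =>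
        (PySem.List.pyRange 0 ((p.2.length : Int) + 1) 1).map (fun r => (p.1, r)))
      = (PySem.List.pyRange 0 (kpt.length : Int) 1).flatMap (fun k =>
        (PySem.List.pyRange 0 (((PySem.List.pyGetD kpt k []).length : Int) + 1) 1).map
          (fun r => (k, r))) := by
    rw [PySem.List.enumerate_eq_map_pyRange kpt [], List.flatMap_map]
    simp
  have key2 : (PySem.List.enumerate kpt).reverse.flatMap (fun p =>
        (PySem.List.pyRange 0 ((p.2.length : Int) + 1) 1).map (fun r => (p.1, r)))
      = ((PySem.List.pyRange 0 (kpt.length : Int) 1).reverse).flatMap (fun k =>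
        (PySem.List.pyRange 0 (((PySem.List.pyGetD kpt k []).length : Int) + 1) 1).map
          (fun r => (k, r))) := by
    rw [PySem.List.enumerate_eq_map_pyRange kpt [], ← List.map_reverse, List.flatMap_map]
    simp
  by_cases hL : PySem.Str.pyGet? convention 0 = some 'L' <;>
    by_cases hS : PySem.Str.pyGet? convention 1 = some 'S' <;>
      simp only [hL, hS, if_true, if_false, hrange, key, key2]

-- the candidate list (global index, residue key, cell) of the event stream, given an initial carry
def pvCands : List (Int × Bool × Int × Option (Int × Int × Int)) → PySem.Dict Int Int →
    List (Int × Int × Option (Int × Int × Int))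
  | [], _ => []
  | e :: es, c =>
    if e.2.1 then pvCands es (c.modify e.2.2.1 0 (· + 1))
    else if c.getD e.2.2.1 0 = 0 then (e.1, e.2.2.1, e.2.2.2) :: pvCands es c
    else pvCands es (c.modify e.2.2.1 0 (· - 1))

-- A's fold: final ret = the cell of the last candidate (or the initial ret)
theorem pvA_foldl_eq_cands (ies : List (Int × Bool × Int × Option (Int × Int × Int)))
    (c : PySem.Dict Int Int) (ret : Option (Int × Int × Int)) :
    ((ies.map (·.2)).foldl pvEStep (c, ret)).2
      = (pvCands ies c).foldl (fun _ p => p.2.2) ret := by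
  induction ies generalizing c ret with
  | nil => simp [pvCands]
  | cons e es ih =>
    rw [List.map_cons, List.foldl_cons]
    unfold pvCands pvEStep
    by_cases h1 : e.2.1
    · simp only [h1, if_true]; exact ih _ _
    · simp only [h1]
      by_cases h2 : c.getD e.2.2.1 0 = 0
      · simp only [h2, if_true]; exact ih _ _
      · simp only [h2, if_false]; exact ih _ _

-- B's per-residue scan, producing that residue's candidates in order
def pvKeyCands : List (Int × Bool × Option (Int × Int × Int)) → Int →
    List (Int × Option (Int × Int × Int))
  | [], _ => []
  | e :: es, c =>
    if e.2.1 then pvKeyCands es (c + 1)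
    else if c = 0 then (e.1, e.2.2) :: pvKeyCands es c
    else pvKeyCands es (c - 1)

-- per-residue projection: scanning the κ-filtered stream = filtering the global candidate list
theorem pvKeyCands_eq_filter (ies : List (Int × Bool × Int × Option (Int × Int × Int)))
    (c : PySem.Dict Int Int) (κ : Int) :
    pvKeyCands ((ies.filter (fun p => p.2.2.1 == κ)).map (fun p => (p.1, p.2.1, p.2.2.2)))
        (c.getD κ 0)
      = (pvCands ies c).filterMap (fun q => if q.2.1 = κ then some (q.1, q.2.2) else none) := by
  induction ies generalizing c with
  | nil => simp [pvCands, pvKeyCands]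
  | cons e es ih =>
    by_cases hκ : e.2.2.1 = κ
    · rw [List.filter_cons_of_pos (by simp [hκ]), List.map_cons]
      unfold pvCands pvKeyCands
      by_cases h1 : e.2.1
      · simp only [h1, if_true]
        rw [← ih (c.modify e.2.2.1 0 (· + 1))]
        rw [hκ, PySem.Dict.getD_modify_self]
      · rw [Bool.not_eq_true] at h1
        simp only [h1, Bool.false_eq_true, if_false]
        by_cases h2 : c.getD e.2.2.1 0 = 0
        · have h2' : c.getD κ 0 = 0 := by rw [← hκ]; exact h2
          simp only [h2', if_true, List.filterMap_cons, hκ]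
          have h3 := ih c
          rw [h2'] at h3
          rw [h3]
        · have h2' : ¬ c.getD κ 0 = 0 := by rw [← hκ]; exact h2
          simp only [h2, h2', if_false]
          rw [← ih (c.modify e.2.2.1 0 (· - 1))]
          rw [hκ, PySem.Dict.getD_modify_self]
    · rw [List.filter_cons_of_neg (by simp [hκ])]
      unfold pvCands
      by_cases h1 : e.2.1
      · simp only [h1, if_true]
        rw [← ih (c.modify e.2.2.1 0 (· + 1)),
          PySem.Dict.getD_modify_of_ne _ _ _ (fun h => hκ h.symm)]
      · rw [Bool.not_eq_true] at h1
        simp only [h1, Bool.false_eq_true, if_false]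
        by_cases h2 : c.getD e.2.2.1 0 = 0
        · simp only [h2, if_true, List.filterMap_cons, if_neg hκ]
          exact ih c
        · simp only [h2, if_false]
          rw [← ih (c.modify e.2.2.1 0 (· - 1)),
            PySem.Dict.getD_modify_of_ne _ _ _ (fun h => hκ h.symm)]

-- B's inner loop = folding pvBConsider over the residue's candidates
theorem pvInner_eq_keyCands (evs : List (Int × Bool × Option (Int × Int × Int))) (c : Int)
    (best : Option (Int × Option (Int × Int × Int))) :
    ((evs.foldl (fun st ev =>
        if ev.2.1 then (st.1 + 1, st.2)
        else if st.1 = 0 then (st.1, pvBConsider st.2 ev.1 ev.2.2)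
        else (st.1 - 1, st.2)) (c, best)).2)
      = (pvKeyCands evs c).foldl (fun b p => pvBConsider b p.1 p.2) best := by
  induction evs generalizing c best with
  | nil => simp [pvKeyCands]
  | cons e es ih =>
    rw [List.foldl_cons]
    unfold pvKeyCands
    by_cases h1 : e.2.1
    · simp only [h1, if_true]; exact ih _ _
    · simp only [h1]
      by_cases h2 : c = 0
      · simp only [h2, if_true]; exact ih _ _
      · simp only [h2, if_false]; exact ih _ _

-- the pvBConsider fold returns an element of maximal first component
theorem pvConsider_foldl_none (l : List (Int × Option (Int × Int × Int)))
    (acc : Option (Int × Option (Int × Int × Int)))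
    (h : l.foldl (fun b p => pvBConsider b p.1 p.2) acc = none) : acc = none ∧ l = [] := by
  induction l generalizing acc with
  | nil => exact ⟨h, rfl⟩
  | cons q l ih =>
    rw [List.foldl_cons] at h
    have := (ih _ h).1
    unfold pvBConsider at this
    cases acc with
    | none => simp at this
    | some b => simp only at this; split at this <;> simp at this

theorem pvConsider_foldl_spec (l : List (Int × Option (Int × Int × Int)))
    (acc : Option (Int × Option (Int × Int × Int))) (m : Int × Option (Int × Int × Int))
    (h : l.foldl (fun b p => pvBConsider b p.1 p.2) acc = some m) :
    (acc = some m ∨ m ∈ l) ∧ (∀ q ∈ l, q.1 ≤ m.1) ∧ (∀ b, acc = some b → b.1 ≤ m.1) := by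
  induction l generalizing acc with
  | nil =>
    rw [List.foldl_nil] at h
    refine ⟨Or.inl h, by simp, ?_⟩
    intro b hb; rw [h] at hb; cases hb; rfl
  | cons q l ih =>
    rw [List.foldl_cons] at h
    obtain ⟨hmem, hall, hacc⟩ := ih _ h
    have hq : q.1 ≤ m.1 := by
      have : (pvBConsider acc q.1 q.2) = some (q.1, q.2) ∨
          (∃ b, acc = some b ∧ pvBConsider acc q.1 q.2 = some b ∧ q.1 ≤ b.1) := by
        unfold pvBConsider
        cases acc with
        | none => exact Or.inl rfl
        | some b =>
          simp only
          split
          · exact Or.inl rfl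
          · exact Or.inr ⟨b, rfl, rfl, by omega⟩
      rcases this with h1 | ⟨b, _, h1, hle⟩
      · have := hacc _ h1; simpa using this
      · have := hacc _ h1; omega
    refine ⟨?_, ?_, ?_⟩
    · rcases hmem with h1 | h1
      · unfold pvBConsider at h1
        cases acc with
        | none =>
          simp only at h1; cases h1; exact Or.inr (by simp)
        | some b =>
          simp only at h1
          split at h1
          · cases h1; exact Or.inr (by simp)
          · cases h1; exact Or.inl rfl
      · exact Or.inr (List.mem_cons_of_mem _ h1)
    · intro p hp
      rcases List.mem_cons.mp hp with h1 | h1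
      · subst h1; exact hq
      · exact hall _ h1
    · intro b hb
      have : pvBConsider acc q.1 q.2 = some (q.1, q.2) ∨ pvBConsider acc q.1 q.2 = some b := by
        unfold pvBConsider
        cases acc with
        | none => exact Or.inl rfl
        | some b' =>
          cases hb; simp only
          split
          · exact Or.inl rfl
          · exact Or.inr rfl
      rcases this with h1 | h1
      · have h2 := hacc _ h1
        unfold pvBConsider at h1
        cases acc with
        | none => cases hb
        | some b' =>
          cases hb; simp only at h1
          split at h1
          · rename_i hlt; simp at h2 ⊢; omega
          · cases h1; simp at h2; omega
      · exact hacc _ h1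

theorem pvCands_sublist (ies : List (Int × Bool × Int × Option (Int × Int × Int)))
    (c : PySem.Dict Int Int) :
    (pvCands ies c).Sublist (ies.map (fun p => (p.1, p.2.2.1, p.2.2.2))) := by
  induction ies generalizing c with
  | nil => simp [pvCands]
  | cons e es ih =>
    rw [List.map_cons]
    unfold pvCands
    by_cases h1 : e.2.1
    · simp only [h1, if_true]; exact (ih _).cons _
    · simp only [h1]
      by_cases h2 : c.getD e.2.2.1 0 = 0
      · simp only [h2, if_true]; exact (ih _).cons₂ _
      · simp only [h2, if_false]; exact (ih _).cons _

theorem pvCands_key_mem (ies : List (Int × Bool × Int × Option (Int × Int × Int)))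
    (c : PySem.Dict Int Int) (q : Int × Int × Option (Int × Int × Int)) (hq : q ∈ pvCands ies c) :
    q.2.1 ∈ ies.map (fun p => p.2.2.1) := by
  have := (pvCands_sublist ies c).mem hq
  obtain ⟨p, hp, hpe⟩ := List.mem_map.mp this
  exact List.mem_map.mpr ⟨p, hp, by rw [← hpe]⟩

theorem pvFoldl_const_eq_getLast {α β : Type} (l : List α) (f : α → β) (r : β) :
    l.foldl (fun _ p => f p) r = ((l.getLast?).map f).getD r := by
  induction l generalizing r with
  | nil => simp
  | cons a l ih =>
    rw [List.foldl_cons, ih]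
    cases l with
    | nil => simp
    | cons b t =>
      obtain ⟨x, hx⟩ := Option.isSome_iff_exists.mp (by simp : (b :: t).getLast?.isSome)
      simp [List.getLast?_cons_cons, hx]


-- the two ports agree on every input (the precondition is not needed for the ports themselves)
theorem pvMain (kpt : List (List Int)) (multicharge : List Int) (convention : String) :
    a_good_cell kpt multicharge convention = a_good_cell_alt kpt multicharge convention := by
  have hBdef : a_good_cell_alt kpt multicharge convention
      = (((PySem.List.enumerate
            ((pvBRows kpt convention).flatMap (pvBRowEvents kpt multicharge))).foldl
          (fun g p => g.modify p.2.2.1 [] (· ++ [(p.1, p.2.1, p.2.2.2)]))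
          PySem.Dict.empty).items.foldl (fun best kv =>
            (kv.2.foldl (fun st ev =>
              if ev.2.1 then (st.1 + 1, st.2)
              else if st.1 = 0 then (st.1, pvBConsider st.2 ev.1 ev.2.2)
              else (st.1 - 1, st.2)) ((0 : Int), best)).2) none).bind (fun p => p.2) := rfl
  have hAdef : a_good_cell kpt multicharge convention
      = ((pvBRows kpt convention).foldl (pvAStep kpt multicharge)
          (PySem.Dict.empty, none)).2 := by
    unfold a_good_cell
    rw [pvRows_eq]
  rw [hAdef, hBdef]
  -- shared data
  set rows := pvBRows kpt convention with hrows
  set events := rows.flatMap (pvBRowEvents kpt multicharge) with hevents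
  set ies := PySem.List.enumerate events with hies
  set C := pvCands ies PySem.Dict.empty with hC
  -- ===== A side: fold over rows = candidate-list last =====
  have hAfold : (rows.foldl (pvAStep kpt multicharge) (PySem.Dict.empty, none)).2
      = ((C.getLast?).map (fun p => p.2.2)).getD none := by
    have h1 : rows.foldl (pvAStep kpt multicharge) (PySem.Dict.empty, none)
        = rows.foldl (fun st row => (pvBRowEvents kpt multicharge row).foldl pvEStep st)
            (PySem.Dict.empty, none) := by
      have : pvAStep kpt multicharge
          = fun st row => (pvBRowEvents kpt multicharge row).foldl pvEStep st :=
        funext fun st => funext fun row => pvAStep_eq_foldl kpt multicharge st row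
      rw [this]
    rw [h1, ← List.foldl_flatMap, ← hevents, ← PySem.List.map_snd_enumerate events 0,
      pvA_foldl_eq_cands, pvFoldl_const_eq_getLast]
  rw [hAfold]
  -- ===== B side: groups =====
  set groups := (ies.foldl
      (fun g p => g.modify p.2.2.1 [] (· ++ [(p.1, p.2.1, p.2.2.2)])) PySem.Dict.empty :
      PySem.Dict Int (List (Int × Bool × Option (Int × Int × Int)))) with hgroups
  have hknd : groups.keys.Nodup := by
    rw [hgroups]
    exact PySem.Dict.nodup_keys_foldl_modify_key ies (fun p => p.2.2.1) []
      (fun g p => (· ++ [(p.1, p.2.1, p.2.2.2)])) PySem.Dict.empty (by simp)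
  have hkeys : groups.keys = PySem.Set.ofList (ies.map (fun p => p.2.2.1)) := by
    rw [hgroups]
    rw [PySem.Dict.keys_foldl_modify_key ies (fun p => p.2.2.1) []
      (fun g p => (· ++ [(p.1, p.2.1, p.2.2.2)])) PySem.Dict.empty]
    simp [PySem.Set.update_nil_left]
  have hgetD : ∀ κ : Int, groups.getD κ []
      = (ies.filter (fun p => p.2.2.1 == κ)).map (fun p => (p.1, p.2.1, p.2.2.2)) := by
    intro κ
    have hmapfold : groups = (ies.map (fun p => (p.2.2.1, (p.1, p.2.1, p.2.2.2)))).foldl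
        (fun d p => d.modify p.1 [] (· ++ [p.2])) PySem.Dict.empty := by
      rw [hgroups, List.foldl_map]
    rw [hmapfold, PySem.Dict.getD_foldl_modify_append]
    simp only [List.filter_map, List.map_map]
    rfl
  have hkc : ∀ κ : Int, pvKeyCands (groups.getD κ []) 0
      = C.filterMap (fun q => if q.2.1 = κ then some (q.1, q.2.2) else none) := by
    intro κ
    rw [hgetD κ]
    have h0 : (PySem.Dict.empty : PySem.Dict Int Int).getD κ 0 = 0 := by
      simp [PySem.Dict.getD_empty]
    rw [← h0, pvKeyCands_eq_filter, ← hC]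
  -- B's best as a fold over the flattened per-residue candidates
  have hBbest : (groups.items.foldl (fun best kv =>
        (kv.2.foldl (fun st ev =>
          if ev.2.1 then (st.1 + 1, st.2)
          else if st.1 = 0 then (st.1, pvBConsider st.2 ev.1 ev.2.2)
          else (st.1 - 1, st.2)) ((0 : Int), best)).2) none)
      = (groups.keys.flatMap (fun κ => pvKeyCands (groups.getD κ []) 0)).foldl
          (fun b p => pvBConsider b p.1 p.2) none := by
    have h2 : (fun (best : Option (Int × Option (Int × Int × Int)))
        (kv : Int × List (Int × Bool × Option (Int × Int × Int))) =>
        (kv.2.foldl (fun st ev =>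
          if ev.2.1 then (st.1 + 1, st.2)
          else if st.1 = 0 then (st.1, pvBConsider st.2 ev.1 ev.2.2)
          else (st.1 - 1, st.2)) ((0 : Int), best)).2)
        = fun best kv => (pvKeyCands kv.2 0).foldl (fun b p => pvBConsider b p.1 p.2) best :=
      funext fun best => funext fun kv => pvInner_eq_keyCands kv.2 0 best
    rw [h2, PySem.Dict.items_eq_map_keys groups hknd [], List.foldl_map, ← List.foldl_flatMap]
  rw [hBbest]
  set Lall := groups.keys.flatMap (fun κ => pvKeyCands (groups.getD κ []) 0) with hLall
  have hLsub : ∀ q ∈ Lall, ∃ p ∈ C, q = (p.1, p.2.2) := by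
    intro q hq
    obtain ⟨κ, _, hqin⟩ := List.mem_flatMap.mp hq
    rw [hkc κ] at hqin
    obtain ⟨p, hp, hpe⟩ := List.mem_filterMap.mp hqin
    refine ⟨p, hp, ?_⟩
    by_cases h : p.2.1 = κ
    · rw [if_pos h] at hpe; cases hpe; rfl
    · rw [if_neg h] at hpe; cases hpe
  -- candidates have strictly increasing global indices
  have hCpair : C.Pairwise (fun a b => a.1 < b.1) := by
    have hies : ies.Pairwise (fun p q => p.1 < q.1) := PySem.List.pairwise_lt_enumerate events 0
    have hmap : (ies.map (fun p => (p.1, p.2.2.1, p.2.2.2))).Pairwise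
        (fun a b => a.1 < b.1) := List.pairwise_map.mpr hies
    exact hmap.sublist (pvCands_sublist ies PySem.Dict.empty)
  cases hL : C.getLast? with
  | none =>
    have hCnil : C = [] := List.getLast?_eq_none_iff.mp hL
    have hnil : Lall = [] := by
      rw [hLall]
      apply List.flatMap_eq_nil_iff.mpr
      intro κ _
      rw [hkc κ, hCnil, List.filterMap_nil]
    rw [hnil]
    simp
  | some last =>
    obtain ⟨C', hdecomp⟩ := List.getLast?_eq_some_iff.mp hL
    have hlastmem : last ∈ C := by rw [hdecomp]; simp
    have hmax : ∀ p ∈ C, p.1 ≤ last.1 := by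
      intro p hp
      rw [hdecomp] at hCpair hp
      rcases List.mem_append.mp hp with h | h
      · exact le_of_lt ((List.pairwise_append.mp hCpair).2.2 p h last (by simp))
      · cases List.mem_singleton.mp h; rfl
    have hin : (last.1, last.2.2) ∈ Lall := by
      rw [hLall]
      apply List.mem_flatMap.mpr
      refine ⟨last.2.1, ?_, ?_⟩
      · rw [hkeys]
        exact (PySem.Set.mem_ofList _ _).mpr (pvCands_key_mem ies PySem.Dict.empty last hlastmem)
      · rw [hkc last.2.1]
        exact List.mem_filterMap.mpr ⟨last, hlastmem, by simp⟩
    cases hR : Lall.foldl (fun b p => pvBConsider b p.1 p.2) none with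
    | none =>
      have := (pvConsider_foldl_none Lall none hR).2
      rw [this] at hin
      cases hin
    | some m =>
      obtain ⟨hmem, hall, _⟩ := pvConsider_foldl_spec Lall none m hR
      have hmmem : m ∈ Lall := by
        rcases hmem with h | h
        · cases h
        · exact h
      obtain ⟨p, hp, hpe⟩ := hLsub m hmmem
      have hple : p.1 ≤ last.1 := hmax p hp
      have hlem : last.1 ≤ m.1 := hall _ hin
      have hpfst : p.1 = last.1 := by rw [hpe] at hlem; simp at hlem; omega
      have hnodfst : (C.map (fun p => p.1)).Nodup := by
        have : C.Pairwise (fun a b => a.1 ≠ b.1) := hCpair.imp (fun h => ne_of_lt h)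
        exact List.pairwise_map.mpr this
      have hpl : p = last := List.inj_on_of_nodup_map hnodfst hp hlastmem hpfst
      rw [hpe, hpl]
      simp

-- ===== VERDICT (by name: the statement is the Claim_ definition above) =====
theorem a_good_cell_spec : Claim_equal_a_good_cell := by
  intro kpt multicharge convention _ _
  exact pvMain kpt multicharge convention
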